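-- pv_equiv track=rewrite | github.com/DevinGoodwin/Portfolio | Python/Sets.py | do_parts_cover_set
-- ===== SOURCE A (Python) =====
-- def do_parts_cover_set(s, p):
--     for i in s:
--         x = 0
--         for j in range(len(p)):
--             if i in p[j]:
--                 x = 1
--         if x == 0:
--             return False
--     return True
-- ===== SOURCE B (Python) =====
-- def do_parts_cover_set(s, p):
--     remaining = set(s)
--     for part in p:
--         remaining.difference_update(part)
--     return not remaining
-- ===== Notes on version B (the rewrite author's own statement) =====
-- stated objective: faster
-- what changed: Replaces the per-element scan over all parts with a single pass over the parts that shrinks a residual set of still-uncovered elements, returning whether it is empty.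
import Mathlib
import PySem

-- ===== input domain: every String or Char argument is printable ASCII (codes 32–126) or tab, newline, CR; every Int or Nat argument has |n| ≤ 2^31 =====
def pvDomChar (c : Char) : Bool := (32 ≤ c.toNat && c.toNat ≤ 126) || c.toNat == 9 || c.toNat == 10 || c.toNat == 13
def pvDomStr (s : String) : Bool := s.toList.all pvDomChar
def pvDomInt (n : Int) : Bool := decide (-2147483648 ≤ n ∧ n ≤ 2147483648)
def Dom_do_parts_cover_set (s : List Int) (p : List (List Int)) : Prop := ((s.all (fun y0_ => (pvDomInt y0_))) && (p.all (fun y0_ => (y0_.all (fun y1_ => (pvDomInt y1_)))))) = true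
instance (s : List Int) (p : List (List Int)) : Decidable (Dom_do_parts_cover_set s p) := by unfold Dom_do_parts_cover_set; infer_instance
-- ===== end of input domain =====

-- B replaces A's per-element scan over all parts by one pass over the parts that
-- shrinks a residual set of uncovered elements; return value equivalence, both total.

-- ===== PORT A =====
-- for i in s: x = 0; for j in range(len(p)): if i in p[j]: x = 1; if x == 0: return False / return True
def do_parts_cover_set (s : List Int) (p : List (List Int)) : Bool :=
  match s with
  | [] => true
  | i :: rest =>
    let x : Int := (PySem.List.pyRange 0 p.length 1).foldl
      (fun x j => if (PySem.List.pyGetD p j []).contains i then 1 else x) 0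
    if x = 0 then false else do_parts_cover_set rest p

-- ===== PORT B =====
-- remaining = set(s); for part in p: remaining.difference_update(part); return not remaining
def do_parts_cover_set_alt (s : List Int) (p : List (List Int)) : Bool :=
  let remaining : PySem.Set Int :=
    p.foldl (fun r part => PySem.Set.diff r part) (PySem.Set.ofList s)
  remaining.isEmpty

-- ===== PRECONDITION & SPEC =====
def Spec_do_parts_cover_set (s : List Int) (p : List (List Int)) (out : Bool) : Prop := out = do_parts_cover_set_alt s p
instance (s : List Int) (p : List (List Int)) (out : Bool) : Decidable (Spec_do_parts_cover_set s p out) := by unfold Spec_do_parts_cover_set; infer_instance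

-- ===== CLAIM (what is proved, stated in full; the proofs are below) =====
def Claim_equal_do_parts_cover_set : Prop := ∀ (s : List Int) (p : List (List Int)), Dom_do_parts_cover_set s p → Spec_do_parts_cover_set s p (do_parts_cover_set s p)

-- ===== LEMMAS AND PROOFS =====

-- A's inner loop: x ends as 1 iff some part contains i, else stays at its start value
theorem inner_fold_eq (i : Int) (l : List (List Int)) (x0 : Int) :
    l.foldl (fun x part => if part.contains i then 1 else x) x0
      = if l.any (fun part => part.contains i) then 1 else x0 := by
  induction l generalizing x0 with
  | nil => simp
  | cons hd tl ih =>
    simp only [List.foldl_cons, List.any_cons, ih, Bool.or_eq_true]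
    by_cases h2 : (tl.any fun part => part.contains i) = true
    · rw [if_pos h2, if_pos (Or.inr h2)]
    · by_cases h1 : hd.contains i = true
      · rw [if_neg h2, if_pos h1, if_pos (Or.inl h1)]
      · rw [if_neg h2, if_neg h1, if_neg (by tauto)]

-- A computes: every element of s lies in some part
theorem portA_eq_all (s : List Int) (p : List (List Int)) :
    do_parts_cover_set s p
      = s.all (fun i => p.any (fun part => part.contains i)) := by
  induction s with
  | nil => rfl
  | cons i rest ih =>
    show (if ((PySem.List.pyRange 0 p.length 1).foldl
        (fun x j => if (PySem.List.pyGetD p j []).contains i then 1 else x) 0) = 0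
        then false else do_parts_cover_set rest p) = _
    rw [PySem.List.foldl_pyRange_zero_pyGetD' p ([] : List Int)
        (fun x part => if part.contains i then 1 else x) 0, inner_fold_eq,
      List.all_cons, ih]
    by_cases h : (p.any fun part => part.contains i) = true
    · rw [if_pos h, if_neg one_ne_zero, h, Bool.true_and]
    · rw [Bool.not_eq_true] at h
      rw [h]
      simp

-- B's folded difference keeps exactly the elements of r lying in no part of ps
theorem foldl_diff_mem (ps : List (List Int)) (r : PySem.Set Int) (y : Int) :
    y ∈ ps.foldl (fun r part => PySem.Set.diff r part) r
      ↔ y ∈ r ∧ ∀ part ∈ ps, y ∉ part := by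
  induction ps generalizing r with
  | nil => simp
  | cons hd tl ih =>
    simp only [List.foldl_cons, ih, PySem.Set.mem_diff, List.forall_mem_cons]
    tauto

theorem ports_agree (s : List Int) (p : List (List Int)) :
    do_parts_cover_set s p = do_parts_cover_set_alt s p := by
  rw [portA_eq_all]
  unfold do_parts_cover_set_alt
  rw [Bool.eq_iff_iff, List.isEmpty_iff, List.eq_nil_iff_forall_not_mem]
  simp only [List.all_eq_true, List.any_eq_true, List.contains_iff_mem,
    foldl_diff_mem, PySem.Set.mem_ofList]
  constructor
  · rintro h y ⟨hy, hno⟩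
    obtain ⟨part, hp, hin⟩ := h y hy
    exact hno part hp hin
  · intro h i hi
    by_contra hno
    push_neg at hno
    exact h i ⟨hi, hno⟩

-- ===== VERDICT (by name: the statement is the Claim_ definition above) =====
theorem do_parts_cover_set_spec : Claim_equal_do_parts_cover_set := by
  intro s p _
  unfold Spec_do_parts_cover_set
  exact ports_agree s p
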